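-- pv_equiv track=rewrite | github.com/openpx-trade/openpx | scripts/generate_sdk_docs.py | categorize_types
-- ===== SOURCE A (Python) =====
-- from typing import Any
--
-- def categorize_types(definitions: dict[str, Any]) -> dict[str, list[str]]:
--     """Group type names into categories."""
--     categories: dict[str, list[str]] = {
--         "Market Data": [],
--         "Orders & Trading": [],
--         "Account & Positions": [],
--         "Orderbook": [],
--         "Trades & History": [],
--         "WebSocket & Streaming": [],
--         "Configuration & Requests": [],
--     }
--
--     market_types = {"Market", "UnifiedMarket", "OutcomeToken", "MarketStatus"}
--     order_types = {"Order", "OrderType", "OrderSide", "OrderStatus", "LiquidityRole", "Fill"}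
--     account_types = {"Position", "Nav", "PositionBreakdown", "DeltaInfo"}
--     orderbook_types = {"Orderbook", "OrderbookSnapshot", "PriceLevel", "PriceLevelChange", "PriceLevelSide"}
--     trade_types = {"MarketTrade", "Candlestick", "PriceHistoryInterval"}
--     ws_types = {"ActivityEvent", "ActivityTrade", "ActivityFill"}
--
--     for name in sorted(definitions.keys()):
--         if name in market_types:
--             categories["Market Data"].append(name)
--         elif name in order_types:
--             categories["Orders & Trading"].append(name)
--         elif name in account_types:
--             categories["Account & Positions"].append(name)
--         elif name in orderbook_types:
--             categories["Orderbook"].append(name)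
--         elif name in trade_types:
--             categories["Trades & History"].append(name)
--         elif name in ws_types:
--             categories["WebSocket & Streaming"].append(name)
--         else:
--             categories["Configuration & Requests"].append(name)
--
--     return {k: v for k, v in categories.items() if v}
-- ===== SOURCE B (Python) =====
-- def categorize_types(definitions):
--     """Group type names into categories."""
--     groups = [
--         ("Market Data", {"Market", "UnifiedMarket", "OutcomeToken", "MarketStatus"}),
--         ("Orders & Trading", {"Order", "OrderType", "OrderSide", "OrderStatus", "LiquidityRole", "Fill"}),
--         ("Account & Positions", {"Position", "Nav", "PositionBreakdown", "DeltaInfo"}),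
--         ("Orderbook", {"Orderbook", "OrderbookSnapshot", "PriceLevel", "PriceLevelChange", "PriceLevelSide"}),
--         ("Trades & History", {"MarketTrade", "Candlestick", "PriceHistoryInterval"}),
--         ("WebSocket & Streaming", {"ActivityEvent", "ActivityTrade", "ActivityFill"}),
--     ]
--     names = sorted(definitions)
--     result = {}
--     for cat, members in groups:
--         bucket = [n for n in names if n in members]
--         if bucket:
--             result[cat] = bucket
--     known = {n for _, members in groups for n in members}
--     rest = [n for n in names if n not in known]
--     if rest:
--         result["Configuration & Requests"] = rest
--     return result
-- ===== Notes on version B (the rewrite author's own statement) =====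
-- stated objective: simpler
-- what changed: Replaces the name-major loop with a 7-way if/elif cascade by a category-major pass: for each fixed category filter the sorted names by membership in its set (valid because the sets are pairwise disjoint), with the leftover names collected last as Configuration & Requests.
import Mathlib
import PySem

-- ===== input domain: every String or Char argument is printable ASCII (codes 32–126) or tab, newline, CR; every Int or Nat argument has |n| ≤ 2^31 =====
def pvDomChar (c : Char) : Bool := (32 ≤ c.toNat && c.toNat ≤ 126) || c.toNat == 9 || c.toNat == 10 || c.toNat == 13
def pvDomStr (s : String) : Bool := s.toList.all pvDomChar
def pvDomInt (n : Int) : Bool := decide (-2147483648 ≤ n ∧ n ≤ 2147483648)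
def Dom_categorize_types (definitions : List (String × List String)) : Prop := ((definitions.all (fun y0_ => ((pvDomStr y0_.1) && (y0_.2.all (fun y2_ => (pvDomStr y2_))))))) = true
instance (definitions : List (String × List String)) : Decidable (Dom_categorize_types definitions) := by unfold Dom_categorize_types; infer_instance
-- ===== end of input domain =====

-- B groups category-major: one membership filter of the sorted names per fixed category (the sets are pairwise disjoint), leftovers last, instead of A's name-major loop with a 7-way if/elif cascade (objective: simpler).

-- ===== PORT A =====
def categorize_types (definitions : List (String × List String)) : List (String × List String) :=
  let categories : PySem.Dict String (List String) :=
    PySem.Dict.ofList [("Market Data", []), ("Orders & Trading", []), ("Account & Positions", []),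
      ("Orderbook", []), ("Trades & History", []), ("WebSocket & Streaming", []),
      ("Configuration & Requests", [])]
  let market_types : PySem.Set String := PySem.Set.ofList ["Market", "UnifiedMarket", "OutcomeToken", "MarketStatus"]
  let order_types : PySem.Set String := PySem.Set.ofList ["Order", "OrderType", "OrderSide", "OrderStatus", "LiquidityRole", "Fill"]
  let account_types : PySem.Set String := PySem.Set.ofList ["Position", "Nav", "PositionBreakdown", "DeltaInfo"]
  let orderbook_types : PySem.Set String := PySem.Set.ofList ["Orderbook", "OrderbookSnapshot", "PriceLevel", "PriceLevelChange", "PriceLevelSide"]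
  let trade_types : PySem.Set String := PySem.Set.ofList ["MarketTrade", "Candlestick", "PriceHistoryInterval"]
  let ws_types : PySem.Set String := PySem.Set.ofList ["ActivityEvent", "ActivityTrade", "ActivityFill"]
  let categories :=
    (PySem.List.sorted (PySem.Dict.keys (PySem.Dict.ofList definitions)) (fun x => x) false).foldl
      (fun cats name =>
        if PySem.Set.contains market_types name then
          cats.modify "Market Data" [] (fun v => v ++ [name])
        else if PySem.Set.contains order_types name then
          cats.modify "Orders & Trading" [] (fun v => v ++ [name])
        else if PySem.Set.contains account_types name then
          cats.modify "Account & Positions" [] (fun v => v ++ [name])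
        else if PySem.Set.contains orderbook_types name then
          cats.modify "Orderbook" [] (fun v => v ++ [name])
        else if PySem.Set.contains trade_types name then
          cats.modify "Trades & History" [] (fun v => v ++ [name])
        else if PySem.Set.contains ws_types name then
          cats.modify "WebSocket & Streaming" [] (fun v => v ++ [name])
        else
          cats.modify "Configuration & Requests" [] (fun v => v ++ [name]))
      categories
  (categories.items.foldl (fun d kv => if kv.2 ≠ [] then d.insert kv.1 kv.2 else d)
    PySem.Dict.empty).items

-- ===== PORT B =====
def categorize_types_alt (definitions : List (String × List String)) : List (String × List String) :=
  let groups : List (String × PySem.Set String) :=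
    [("Market Data", PySem.Set.ofList ["Market", "UnifiedMarket", "OutcomeToken", "MarketStatus"]),
     ("Orders & Trading", PySem.Set.ofList ["Order", "OrderType", "OrderSide", "OrderStatus", "LiquidityRole", "Fill"]),
     ("Account & Positions", PySem.Set.ofList ["Position", "Nav", "PositionBreakdown", "DeltaInfo"]),
     ("Orderbook", PySem.Set.ofList ["Orderbook", "OrderbookSnapshot", "PriceLevel", "PriceLevelChange", "PriceLevelSide"]),
     ("Trades & History", PySem.Set.ofList ["MarketTrade", "Candlestick", "PriceHistoryInterval"]),
     ("WebSocket & Streaming", PySem.Set.ofList ["ActivityEvent", "ActivityTrade", "ActivityFill"])]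
  let names := PySem.List.sorted (PySem.Dict.keys (PySem.Dict.ofList definitions)) (fun x => x) false
  let result : PySem.Dict String (List String) :=
    groups.foldl
      (fun result p =>
        let bucket := names.filter (fun n => PySem.Set.contains p.2 n)
        if bucket ≠ [] then result.insert p.1 bucket else result)
      PySem.Dict.empty
  let known : PySem.Set String := PySem.Set.ofList (groups.flatMap (fun p => p.2))
  let rest := names.filter (fun n => !(PySem.Set.contains known n))
  let result := if rest ≠ [] then result.insert "Configuration & Requests" rest else result
  result.items

-- ===== PRECONDITION & SPEC =====
def Spec_categorize_types (definitions : List (String × List String)) (out : List (String × List String)) : Prop := out = categorize_types_alt definitions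
instance (definitions : List (String × List String)) (out : List (String × List String)) : Decidable (Spec_categorize_types definitions out) := by unfold Spec_categorize_types; infer_instance

-- ===== CLAIM (what is proved, stated in full; the proofs are below) =====
def Claim_equal_categorize_types : Prop := ∀ (definitions : List (String × List String)), Dom_categorize_types definitions → Spec_categorize_types definitions (categorize_types definitions)

-- ===== LEMMAS AND PROOFS =====

theorem pv_mod1 (v1 v2 v3 v4 v5 v6 v7 : List String) (x : String) :
    (PySem.Dict.mk [("Market Data", v1), ("Orders & Trading", v2), ("Account & Positions", v3), ("Orderbook", v4), ("Trades & History", v5), ("WebSocket & Streaming", v6), ("Configuration & Requests", v7)]).modify "Market Data" [] (fun v => v ++ [x]) = PySem.Dict.mk [("Market Data", v1 ++ [x]), ("Orders & Trading", v2), ("Account & Positions", v3), ("Orderbook", v4), ("Trades & History", v5), ("WebSocket & Streaming", v6), ("Configuration & Requests", v7)] := rfl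

theorem pv_mod2 (v1 v2 v3 v4 v5 v6 v7 : List String) (x : String) :
    (PySem.Dict.mk [("Market Data", v1), ("Orders & Trading", v2), ("Account & Positions", v3), ("Orderbook", v4), ("Trades & History", v5), ("WebSocket & Streaming", v6), ("Configuration & Requests", v7)]).modify "Orders & Trading" [] (fun v => v ++ [x]) = PySem.Dict.mk [("Market Data", v1), ("Orders & Trading", v2 ++ [x]), ("Account & Positions", v3), ("Orderbook", v4), ("Trades & History", v5), ("WebSocket & Streaming", v6), ("Configuration & Requests", v7)] := rfl

theorem pv_mod3 (v1 v2 v3 v4 v5 v6 v7 : List String) (x : String) :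
    (PySem.Dict.mk [("Market Data", v1), ("Orders & Trading", v2), ("Account & Positions", v3), ("Orderbook", v4), ("Trades & History", v5), ("WebSocket & Streaming", v6), ("Configuration & Requests", v7)]).modify "Account & Positions" [] (fun v => v ++ [x]) = PySem.Dict.mk [("Market Data", v1), ("Orders & Trading", v2), ("Account & Positions", v3 ++ [x]), ("Orderbook", v4), ("Trades & History", v5), ("WebSocket & Streaming", v6), ("Configuration & Requests", v7)] := rfl

theorem pv_mod4 (v1 v2 v3 v4 v5 v6 v7 : List String) (x : String) :
    (PySem.Dict.mk [("Market Data", v1), ("Orders & Trading", v2), ("Account & Positions", v3), ("Orderbook", v4), ("Trades & History", v5), ("WebSocket & Streaming", v6), ("Configuration & Requests", v7)]).modify "Orderbook" [] (fun v => v ++ [x]) = PySem.Dict.mk [("Market Data", v1), ("Orders & Trading", v2), ("Account & Positions", v3), ("Orderbook", v4 ++ [x]), ("Trades & History", v5), ("WebSocket & Streaming", v6), ("Configuration & Requests", v7)] := rfl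

theorem pv_mod5 (v1 v2 v3 v4 v5 v6 v7 : List String) (x : String) :
    (PySem.Dict.mk [("Market Data", v1), ("Orders & Trading", v2), ("Account & Positions", v3), ("Orderbook", v4), ("Trades & History", v5), ("WebSocket & Streaming", v6), ("Configuration & Requests", v7)]).modify "Trades & History" [] (fun v => v ++ [x]) = PySem.Dict.mk [("Market Data", v1), ("Orders & Trading", v2), ("Account & Positions", v3), ("Orderbook", v4), ("Trades & History", v5 ++ [x]), ("WebSocket & Streaming", v6), ("Configuration & Requests", v7)] := rfl

theorem pv_mod6 (v1 v2 v3 v4 v5 v6 v7 : List String) (x : String) :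
    (PySem.Dict.mk [("Market Data", v1), ("Orders & Trading", v2), ("Account & Positions", v3), ("Orderbook", v4), ("Trades & History", v5), ("WebSocket & Streaming", v6), ("Configuration & Requests", v7)]).modify "WebSocket & Streaming" [] (fun v => v ++ [x]) = PySem.Dict.mk [("Market Data", v1), ("Orders & Trading", v2), ("Account & Positions", v3), ("Orderbook", v4), ("Trades & History", v5), ("WebSocket & Streaming", v6 ++ [x]), ("Configuration & Requests", v7)] := rfl

theorem pv_mod7 (v1 v2 v3 v4 v5 v6 v7 : List String) (x : String) :
    (PySem.Dict.mk [("Market Data", v1), ("Orders & Trading", v2), ("Account & Positions", v3), ("Orderbook", v4), ("Trades & History", v5), ("WebSocket & Streaming", v6), ("Configuration & Requests", v7)]).modify "Configuration & Requests" [] (fun v => v ++ [x]) = PySem.Dict.mk [("Market Data", v1), ("Orders & Trading", v2), ("Account & Positions", v3), ("Orderbook", v4), ("Trades & History", v5), ("WebSocket & Streaming", v6), ("Configuration & Requests", v7 ++ [x])] := rfl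

set_option maxHeartbeats 1000000 in
theorem pv_foldA (l : List String) (v1 v2 v3 v4 v5 v6 v7 : List String) :
    l.foldl
      (fun cats name =>
        if PySem.Set.contains (PySem.Set.ofList ["Market", "UnifiedMarket", "OutcomeToken", "MarketStatus"]) name then
          cats.modify "Market Data" [] (fun v => v ++ [name])
        else if PySem.Set.contains (PySem.Set.ofList ["Order", "OrderType", "OrderSide", "OrderStatus", "LiquidityRole", "Fill"]) name then
          cats.modify "Orders & Trading" [] (fun v => v ++ [name])
        else if PySem.Set.contains (PySem.Set.ofList ["Position", "Nav", "PositionBreakdown", "DeltaInfo"]) name then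
          cats.modify "Account & Positions" [] (fun v => v ++ [name])
        else if PySem.Set.contains (PySem.Set.ofList ["Orderbook", "OrderbookSnapshot", "PriceLevel", "PriceLevelChange", "PriceLevelSide"]) name then
          cats.modify "Orderbook" [] (fun v => v ++ [name])
        else if PySem.Set.contains (PySem.Set.ofList ["MarketTrade", "Candlestick", "PriceHistoryInterval"]) name then
          cats.modify "Trades & History" [] (fun v => v ++ [name])
        else if PySem.Set.contains (PySem.Set.ofList ["ActivityEvent", "ActivityTrade", "ActivityFill"]) name then
          cats.modify "WebSocket & Streaming" [] (fun v => v ++ [name])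
        else
          cats.modify "Configuration & Requests" [] (fun v => v ++ [name]))
      (PySem.Dict.mk [("Market Data", v1), ("Orders & Trading", v2), ("Account & Positions", v3), ("Orderbook", v4), ("Trades & History", v5), ("WebSocket & Streaming", v6), ("Configuration & Requests", v7)])
    = PySem.Dict.mk [("Market Data", v1 ++ l.filter (fun n => PySem.Set.contains (PySem.Set.ofList ["Market", "UnifiedMarket", "OutcomeToken", "MarketStatus"]) n)), ("Orders & Trading", v2 ++ l.filter (fun n => !PySem.Set.contains (PySem.Set.ofList ["Market", "UnifiedMarket", "OutcomeToken", "MarketStatus"]) n && PySem.Set.contains (PySem.Set.ofList ["Order", "OrderType", "OrderSide", "OrderStatus", "LiquidityRole", "Fill"]) n)), ("Account & Positions", v3 ++ l.filter (fun n => !PySem.Set.contains (PySem.Set.ofList ["Market", "UnifiedMarket", "OutcomeToken", "MarketStatus"]) n && !PySem.Set.contains (PySem.Set.ofList ["Order", "OrderType", "OrderSide", "OrderStatus", "LiquidityRole", "Fill"]) n && PySem.Set.contains (PySem.Set.ofList ["Position", "Nav", "PositionBreakdown", "DeltaInfo"]) n)), ("Orderbook", v4 ++ l.filter (fun n => !PySem.Set.contains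 (PySem.Set.ofList ["Market", "UnifiedMarket", "OutcomeToken", "MarketStatus"]) n && !PySem.Set.contains (PySem.Set.ofList ["Order", "OrderType", "OrderSide", "OrderStatus", "LiquidityRole", "Fill"]) n && !PySem.Set.contains (PySem.Set.ofList ["Position", "Nav", "PositionBreakdown", "DeltaInfo"]) n && PySem.Set.contains (PySem.Set.ofList ["Orderbook", "OrderbookSnapshot", "PriceLevel", "PriceLevelChange", "PriceLevelSide"]) n)), ("Trades & History", v5 ++ l.filter (fun n => !PySem.Set.contains (PySem.Set.ofList ["Market", "UnifiedMarket", "OutcomeToken", "MarketStatus"]) n && !PySem.Set.contains (PySem.Set.ofList ["Order", "OrderType", "OrderSide", "OrderStatus", "LiquidityRole", "Fill"]) n && !PySem.Set.contains (PySem.Set.ofList ["Position", "Nav", "PositionBreakdown", "DeltaInfo"]) n && !PySem.Set.contains (PySem.Set.ofList ["Orderbook", "OrderbookSnapshot", "PriceLevel", "PriceLevelChange", "PriceLevelSide"]) n && PySem.Set.contains (PySem.Set.ofList ["MarketTrade", "Candlestick", "PriceHistoryInterval"]) n)), ("WebSocket & Streaming", v6 ++ l.filter (fun n => !PySem.Set.contains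 (PySem.Set.ofList ["Market", "UnifiedMarket", "OutcomeToken", "MarketStatus"]) n && !PySem.Set.contains (PySem.Set.ofList ["Order", "OrderType", "OrderSide", "OrderStatus", "LiquidityRole", "Fill"]) n && !PySem.Set.contains (PySem.Set.ofList ["Position", "Nav", "PositionBreakdown", "DeltaInfo"]) n && !PySem.Set.contains (PySem.Set.ofList ["Orderbook", "OrderbookSnapshot", "PriceLevel", "PriceLevelChange", "PriceLevelSide"]) n && !PySem.Set.contains (PySem.Set.ofList ["MarketTrade", "Candlestick", "PriceHistoryInterval"]) n && PySem.Set.contains (PySem.Set.ofList ["ActivityEvent", "ActivityTrade", "ActivityFill"]) n)), ("Configuration & Requests", v7 ++ l.filter (fun n => !PySem.Set.contains (PySem.Set.ofList ["Market", "UnifiedMarket", "OutcomeToken", "MarketStatus"]) n && !PySem.Set.contains (PySem.Set.ofList ["Order", "OrderType", "OrderSide", "OrderStatus", "LiquidityRole", "Fill"]) n && !PySem.Set.contains (PySem.Set.ofList ["Position", "Nav", "PositionBreakdown", "DeltaInfo"]) n && !PySem.Set.contains (PySem.Set.ofList ["Orderbook", "OrderbookSnapshot", "PriceLevel", "PriceLevelChange",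 "PriceLevelSide"]) n && !PySem.Set.contains (PySem.Set.ofList ["MarketTrade", "Candlestick", "PriceHistoryInterval"]) n && !PySem.Set.contains (PySem.Set.ofList ["ActivityEvent", "ActivityTrade", "ActivityFill"]) n))] := by
  induction l generalizing v1 v2 v3 v4 v5 v6 v7 with
  | nil => simp
  | cons x t ih =>
    simp only [List.foldl_cons]
    cases h1 : PySem.Set.contains (PySem.Set.ofList ["Market", "UnifiedMarket", "OutcomeToken", "MarketStatus"]) x with
    | true =>
      rw [if_pos rfl]
      rw [pv_mod1, ih]
      simp only [List.filter_cons, h1, Bool.not_true, Bool.not_false, Bool.and_false, Bool.false_and, Bool.true_and, reduceIte, List.append_assoc]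
      rfl
    | false =>
      cases h2 : PySem.Set.contains (PySem.Set.ofList ["Order", "OrderType", "OrderSide", "OrderStatus", "LiquidityRole", "Fill"]) x with
      | true =>
        rw [if_neg (by simp), if_pos rfl]
        rw [pv_mod2, ih]
        simp only [List.filter_cons, h1, h2, Bool.not_true, Bool.not_false, Bool.and_false, Bool.false_and, Bool.true_and, reduceIte, List.append_assoc]
        rfl
      | false =>
        cases h3 : PySem.Set.contains (PySem.Set.ofList ["Position", "Nav", "PositionBreakdown", "DeltaInfo"]) x with
        | true =>
          rw [if_neg (by simp), if_neg (by simp), if_pos rfl]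
          rw [pv_mod3, ih]
          simp only [List.filter_cons, h1, h2, h3, Bool.not_true, Bool.not_false, Bool.and_false, Bool.false_and, Bool.true_and, reduceIte, List.append_assoc]
          rfl
        | false =>
          cases h4 : PySem.Set.contains (PySem.Set.ofList ["Orderbook", "OrderbookSnapshot", "PriceLevel", "PriceLevelChange", "PriceLevelSide"]) x with
          | true =>
            rw [if_neg (by simp), if_neg (by simp), if_neg (by simp), if_pos rfl]
            rw [pv_mod4, ih]
            simp only [List.filter_cons, h1, h2, h3, h4, Bool.not_true, Bool.not_false, Bool.and_false, Bool.false_and, Bool.true_and, reduceIte, List.append_assoc]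
            rfl
          | false =>
            cases h5 : PySem.Set.contains (PySem.Set.ofList ["MarketTrade", "Candlestick", "PriceHistoryInterval"]) x with
            | true =>
              rw [if_neg (by simp), if_neg (by simp), if_neg (by simp), if_neg (by simp), if_pos rfl]
              rw [pv_mod5, ih]
              simp only [List.filter_cons, h1, h2, h3, h4, h5, Bool.not_true, Bool.not_false, Bool.and_false, Bool.false_and, Bool.true_and, reduceIte, List.append_assoc]
              rfl
            | false =>
              cases h6 : PySem.Set.contains (PySem.Set.ofList ["ActivityEvent", "ActivityTrade", "ActivityFill"]) x with
              | true =>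
                rw [if_neg (by simp), if_neg (by simp), if_neg (by simp), if_neg (by simp), if_neg (by simp), if_pos rfl]
                rw [pv_mod6, ih]
                simp only [List.filter_cons, h1, h2, h3, h4, h5, h6, Bool.not_true, Bool.not_false, Bool.and_false, Bool.false_and, Bool.true_and, reduceIte, List.append_assoc]
                rfl
              | false =>
                rw [if_neg (by simp), if_neg (by simp), if_neg (by simp), if_neg (by simp), if_neg (by simp), if_neg (by simp)]
                rw [pv_mod7, ih]
                simp only [List.filter_cons, h1, h2, h3, h4, h5, h6, Bool.not_true, Bool.not_false, Bool.and_false, Bool.false_and, Bool.true_and, reduceIte, List.append_assoc]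
                rfl

theorem pv_feq2 : (fun n => !PySem.Set.contains (PySem.Set.ofList ["Market", "UnifiedMarket", "OutcomeToken", "MarketStatus"]) n && PySem.Set.contains (PySem.Set.ofList ["Order", "OrderType", "OrderSide", "OrderStatus", "LiquidityRole", "Fill"]) n) = (fun n => PySem.Set.contains (PySem.Set.ofList ["Order", "OrderType", "OrderSide", "OrderStatus", "LiquidityRole", "Fill"]) n) := by
  funext n
  cases hp : PySem.Set.contains (PySem.Set.ofList ["Order", "OrderType", "OrderSide", "OrderStatus", "LiquidityRole", "Fill"]) n with
  | false => simp
  | true =>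
    have hmem := by simpa [PySem.Set.contains] using hp
    rcases hmem with rfl|rfl|rfl|rfl|rfl|rfl <;> decide

theorem pv_feq3 : (fun n => !PySem.Set.contains (PySem.Set.ofList ["Market", "UnifiedMarket", "OutcomeToken", "MarketStatus"]) n && !PySem.Set.contains (PySem.Set.ofList ["Order", "OrderType", "OrderSide", "OrderStatus", "LiquidityRole", "Fill"]) n && PySem.Set.contains (PySem.Set.ofList ["Position", "Nav", "PositionBreakdown", "DeltaInfo"]) n) = (fun n => PySem.Set.contains (PySem.Set.ofList ["Position", "Nav", "PositionBreakdown", "DeltaInfo"]) n) := by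
  funext n
  cases hp : PySem.Set.contains (PySem.Set.ofList ["Position", "Nav", "PositionBreakdown", "DeltaInfo"]) n with
  | false => simp
  | true =>
    have hmem := by simpa [PySem.Set.contains] using hp
    rcases hmem with rfl|rfl|rfl|rfl <;> decide

theorem pv_feq4 : (fun n => !PySem.Set.contains (PySem.Set.ofList ["Market", "UnifiedMarket", "OutcomeToken", "MarketStatus"]) n && !PySem.Set.contains (PySem.Set.ofList ["Order", "OrderType", "OrderSide", "OrderStatus", "LiquidityRole", "Fill"]) n && !PySem.Set.contains (PySem.Set.ofList ["Position", "Nav", "PositionBreakdown", "DeltaInfo"]) n && PySem.Set.contains (PySem.Set.ofList ["Orderbook", "OrderbookSnapshot", "PriceLevel", "PriceLevelChange", "PriceLevelSide"]) n) = (fun n => PySem.Set.contains (PySem.Set.ofList ["Orderbook", "OrderbookSnapshot", "PriceLevel", "PriceLevelChange", "PriceLevelSide"]) n) := by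
  funext n
  cases hp : PySem.Set.contains (PySem.Set.ofList ["Orderbook", "OrderbookSnapshot", "PriceLevel", "PriceLevelChange", "PriceLevelSide"]) n with
  | false => simp
  | true =>
    have hmem := by simpa [PySem.Set.contains] using hp
    rcases hmem with rfl|rfl|rfl|rfl|rfl <;> decide

theorem pv_feq5 : (fun n => !PySem.Set.contains (PySem.Set.ofList ["Market", "UnifiedMarket", "OutcomeToken", "MarketStatus"]) n && !PySem.Set.contains (PySem.Set.ofList ["Order", "OrderType", "OrderSide", "OrderStatus", "LiquidityRole", "Fill"]) n && !PySem.Set.contains (PySem.Set.ofList ["Position", "Nav", "PositionBreakdown", "DeltaInfo"]) n && !PySem.Set.contains (PySem.Set.ofList ["Orderbook", "OrderbookSnapshot", "PriceLevel", "PriceLevelChange", "PriceLevelSide"]) n && PySem.Set.contains (PySem.Set.ofList ["MarketTrade", "Candlestick", "PriceHistoryInterval"]) n) = (fun n => PySem.Set.contains (PySem.Set.ofList ["MarketTrade", "Candlestick", "PriceHistoryInterval"]) n) := by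
  funext n
  cases hp : PySem.Set.contains (PySem.Set.ofList ["MarketTrade", "Candlestick", "PriceHistoryInterval"]) n with
  | false => simp
  | true =>
    have hmem := by simpa [PySem.Set.contains] using hp
    rcases hmem with rfl|rfl|rfl <;> decide

theorem pv_feq6 : (fun n => !PySem.Set.contains (PySem.Set.ofList ["Market", "UnifiedMarket", "OutcomeToken", "MarketStatus"]) n && !PySem.Set.contains (PySem.Set.ofList ["Order", "OrderType", "OrderSide", "OrderStatus", "LiquidityRole", "Fill"]) n && !PySem.Set.contains (PySem.Set.ofList ["Position", "Nav", "PositionBreakdown", "DeltaInfo"]) n && !PySem.Set.contains (PySem.Set.ofList ["Orderbook", "OrderbookSnapshot", "PriceLevel", "PriceLevelChange", "PriceLevelSide"]) n && !PySem.Set.contains (PySem.Set.ofList ["MarketTrade", "Candlestick", "PriceHistoryInterval"]) n && PySem.Set.contains (PySem.Set.ofList ["ActivityEvent", "ActivityTrade", "ActivityFill"]) n) = (fun n => PySem.Set.contains (PySem.Set.ofList ["ActivityEvent", "ActivityTrade", "ActivityFill"]) n) := by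
  funext n
  cases hp : PySem.Set.contains (PySem.Set.ofList ["ActivityEvent", "ActivityTrade", "ActivityFill"]) n with
  | false => simp
  | true =>
    have hmem := by simpa [PySem.Set.contains] using hp
    rcases hmem with rfl|rfl|rfl <;> decide

theorem pv_feq7 : (fun n => !PySem.Set.contains (PySem.Set.ofList ["Market", "UnifiedMarket", "OutcomeToken", "MarketStatus"]) n && !PySem.Set.contains (PySem.Set.ofList ["Order", "OrderType", "OrderSide", "OrderStatus", "LiquidityRole", "Fill"]) n && !PySem.Set.contains (PySem.Set.ofList ["Position", "Nav", "PositionBreakdown", "DeltaInfo"]) n && !PySem.Set.contains (PySem.Set.ofList ["Orderbook", "OrderbookSnapshot", "PriceLevel", "PriceLevelChange", "PriceLevelSide"]) n && !PySem.Set.contains (PySem.Set.ofList ["MarketTrade", "Candlestick", "PriceHistoryInterval"]) n && !PySem.Set.contains (PySem.Set.ofList ["ActivityEvent", "ActivityTrade", "ActivityFill"]) n) = (fun n => !PySem.Set.contains (PySem.Set.ofList (([("Market Data", PySem.Set.ofList ["Market", "UnifiedMarket", "OutcomeToken", "MarketStatus"]), ("Orders & Trading", PySem.Set.ofList ["Order",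 "OrderType", "OrderSide", "OrderStatus", "LiquidityRole", "Fill"]), ("Account & Positions", PySem.Set.ofList ["Position", "Nav", "PositionBreakdown", "DeltaInfo"]), ("Orderbook", PySem.Set.ofList ["Orderbook", "OrderbookSnapshot", "PriceLevel", "PriceLevelChange", "PriceLevelSide"]), ("Trades & History", PySem.Set.ofList ["MarketTrade", "Candlestick", "PriceHistoryInterval"]), ("WebSocket & Streaming", PySem.Set.ofList ["ActivityEvent", "ActivityTrade", "ActivityFill"])] : List (String × PySem.Set String)).flatMap (fun p => p.2))) n) := by
  funext n
  simp [PySem.Set.contains, Bool.not_or, Bool.and_assoc]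

-- ===== VERDICT (by name: the statement is the Claim_ definition above) =====
theorem categorize_types_spec : Claim_equal_categorize_types := by
  intro definitions _
  show categorize_types definitions = categorize_types_alt definitions
  simp only [categorize_types, categorize_types_alt]
  rw [show (PySem.Dict.ofList [("Market Data", []), ("Orders & Trading", []), ("Account & Positions", []), ("Orderbook", []), ("Trades & History", []), ("WebSocket & Streaming", []), ("Configuration & Requests", [])] : PySem.Dict String (List String)) = PySem.Dict.mk [("Market Data", []), ("Orders & Trading", []), ("Account & Positions", []), ("Orderbook", []), ("Trades & History", []), ("WebSocket & Streaming", []), ("Configuration & Requests", [])] from rfl]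
  rw [pv_foldA]
  rw [pv_feq2, pv_feq3, pv_feq4, pv_feq5, pv_feq6, pv_feq7]
  rfl
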